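-- pv_equiv track=rewrite | github.com/crazysjf/GTracker-server | common/utils.py | gen_diff
-- ===== SOURCE A (Python) =====
-- def gen_diff(a):
--     '''
--     计算数组a的差分并返回。
--     a中允许有None存在.
--     返回数组的长度比a的长度小1。
--     假设返回值为r:
--     如果a[i] == None, 则r[i] = None；
--     如果a[i] != None，则r[i] = a[i]和最近一个非空值的差。
--     如果a[0] == None则当0处理
--
--     [1, 2, 3]    => [1, 1]
--     [1, None, 3] => [None, 2]
--     [None, 2, 3] => [2, 1]
--     [None, None, 3] => [None, 3]
--     '''
--     r = [None] * (len(a) - 1)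
--     last_unnone = 0 if a[0] == None else a[0]  # 最近一个非None值
--     for i in range(1, len(a)):
--         if a[i] == None:
--             r[i - 1] = None
--         else:
--             if a[i - 1] == None:
--                 r[i - 1] = a[i] - last_unnone
--             else:
--                 r[i - 1] = a[i] - a[i - 1]
--             last_unnone = a[i]
--     return r
-- ===== SOURCE B (Python) =====
-- def gen_diff(a):
--     # Two-pass decomposition: build a forward-fill table of the most recent
--     # non-None value, then subtract pairwise via zip.  Same IndexError on [].
--     cur = 0 if a[0] == None else a[0]
--     filled = []
--     for v in a:
--         if v != None:
--             cur = v
--         filled.append(cur)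
--     return [None if v == None else v - c for v, c in zip(a[1:], filled)]
-- ===== Notes on version B (the rewrite author's own statement) =====
-- stated objective: alternative
-- what changed: A's single rolling-state loop that preallocates r and writes r[i-1] by index (branching on a[i-1] vs a rolling last_unnone) is replaced by a two-pass decomposition: a forward-fill table of the most recent non-None value, then a zip comprehension subtracting each element from the table entry before it.
import Mathlib
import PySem

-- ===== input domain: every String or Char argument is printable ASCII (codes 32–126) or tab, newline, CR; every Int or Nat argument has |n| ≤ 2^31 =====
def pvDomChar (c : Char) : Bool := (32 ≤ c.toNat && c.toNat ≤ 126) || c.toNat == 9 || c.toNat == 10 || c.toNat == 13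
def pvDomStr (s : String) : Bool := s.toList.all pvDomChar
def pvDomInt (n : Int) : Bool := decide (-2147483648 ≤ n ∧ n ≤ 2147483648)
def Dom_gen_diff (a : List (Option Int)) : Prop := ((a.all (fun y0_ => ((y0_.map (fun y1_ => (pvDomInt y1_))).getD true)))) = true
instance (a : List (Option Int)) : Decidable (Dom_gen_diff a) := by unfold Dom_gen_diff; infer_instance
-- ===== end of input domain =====

-- B replaces A's single rolling-state indexed loop by a forward-fill table plus a
-- zip subtraction pass (alternative decomposition, same cost); A = B on nonempty input
-- (both Pythons raise IndexError on [], excluded by Pre_).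


-- ===== PORT A =====
-- loop body of A's 'for i in range(1, len(a))' (state = (r, last_unnone))
def stepA (a : List (Option Int)) (st : List (Option Int) × Int) (i : Int) :
    List (Option Int) × Int :=
  match PySem.List.pyGet? a i with
  | some none => (st.1.set (i - 1).toNat none, st.2)
  | some (some ai) =>
    match PySem.List.pyGet? a (i - 1) with
    | some none => (st.1.set (i - 1).toNat (some (ai - st.2)), ai)
    | some (some prev) => (st.1.set (i - 1).toNat (some (ai - prev)), ai)
    | none => st  -- unreachable: 0 ≤ i - 1 < len(a) for i in range(1, len(a))
  | none => st    -- unreachable for i in range(1, len(a))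

def gen_diff (a : List (Option Int)) : List (Option Int) :=
  match PySem.List.pyGet? a 0 with
  | none => []  -- Python raises IndexError here (a = []); excluded by Pre_
  | some a0 =>
    let last0 : Int := match a0 with | none => 0 | some v => v
    let init : List (Option Int) := List.replicate (a.length - 1) none
    ((PySem.List.pyRange 1 (a.length : Int) 1).foldl (stepA a) (init, last0)).1

-- ===== PORT B =====
def gen_diff_alt (a : List (Option Int)) : List (Option Int) :=
  match PySem.List.pyGet? a 0 with
  | none => []  -- Python raises IndexError here (a = []); excluded by Pre_
  | some a0 =>
    let cur0 : Int := match a0 with | none => 0 | some v => v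
    let filled := (a.foldl (fun (st : Int × List Int) v =>
        let cur : Int := match v with | none => st.1 | some x => x
        (cur, st.2 ++ [cur])) (cur0, ([] : List Int))).2
    List.zipWith (fun v c => match v with
        | none => (none : Option Int)
        | some x => some (x - c))
      (PySem.List.slice a (some 1) none) filled

-- ===== PRECONDITION & SPEC =====
-- Pre_ excludes exactly the empty list, on which both Pythons raise IndexError (a[0]).
def Pre_gen_diff (a : List (Option Int)) : Prop := a ≠ []
instance (a : List (Option Int)) : Decidable (Pre_gen_diff a) := by unfold Pre_gen_diff; infer_instance
def pvWitness_gen_diff : List (Option Int) := [some 1, none, some 3]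

def Spec_gen_diff (a : List (Option Int)) (out : List (Option Int)) : Prop := out = gen_diff_alt a
instance (a : List (Option Int)) (out : List (Option Int)) : Decidable (Spec_gen_diff a out) := by unfold Spec_gen_diff; infer_instance

-- ===== CLAIM (what is proved, stated in full; the proofs are below) =====
def Claim_equal_gen_diff : Prop := ∀ (a : List (Option Int)), Dom_gen_diff a → Pre_gen_diff a → Spec_gen_diff a (gen_diff a)

-- ===== LEMMAS AND PROOFS =====

-- reference recursion: the difference list with rolling last non-None value c
def refD (c : Int) : List (Option Int) → List (Option Int)
  | [] => []
  | none :: t => none :: refD c t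
  | some v :: t => some (v - c) :: refD v t

-- the forward-fill table, and the last non-None value
def fillL (c : Int) : List (Option Int) → List Int
  | [] => []
  | v :: t => (v.getD c) :: fillL (v.getD c) t

def lastNN (c : Int) : List (Option Int) → Int
  | [] => c
  | v :: t => lastNN (v.getD c) t

theorem length_refD (c : Int) (l : List (Option Int)) : (refD c l).length = l.length := by
  induction l generalizing c with
  | nil => rfl
  | cons v t ih => cases v <;> simp [refD, ih]

theorem lastNN_append (c : Int) (l : List (Option Int)) (x : Option Int) :
    lastNN c (l ++ [x]) = x.getD (lastNN c l) := by
  induction l generalizing c with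
  | nil => rfl
  | cons v t ih => simp [lastNN, ih]

theorem refD_append (c : Int) (l : List (Option Int)) (x : Option Int) :
    refD c (l ++ [x]) = refD c l ++ [match x with
      | none => (none : Option Int)
      | some v => some (v - lastNN c l)] := by
  induction l generalizing c with
  | nil => cases x <;> simp [refD, lastNN]
  | cons v t ih => cases v <;> simp [refD, lastNN, ih, Option.getD]

theorem fillL_foldl (l : List (Option Int)) (c : Int) (acc : List Int) :
    l.foldl (fun (st : Int × List Int) v =>
        let cur : Int := match v with | none => st.1 | some x => x
        (cur, st.2 ++ [cur])) (c, acc) = (lastNN c l, acc ++ fillL c l) := by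
  induction l generalizing c acc with
  | nil => simp [lastNN, fillL]
  | cons v t ih => cases v <;> simp [lastNN, fillL, ih, Option.getD]

theorem zipWith_fillL (l : List (Option Int)) (c : Int) :
    List.zipWith (fun v c => match v with
        | none => (none : Option Int)
        | some x => some (x - c)) l (c :: fillL c l) = refD c l := by
  induction l generalizing c with
  | nil => rfl
  | cons v t ih => cases v <;> simp [fillL, refD, ih, Option.getD]

-- B-side characterization
theorem gen_diff_alt_eq_refD (a0 : Option Int) (t : List (Option Int)) :
    gen_diff_alt (a0 :: t) = refD (a0.getD 0) t := by
  unfold gen_diff_alt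
  rw [PySem.List.pyGet?_zero_cons]
  simp only [fillL_foldl, PySem.List.slice_from_one, List.tail_cons]
  have hfill : fillL (a0.getD 0) (a0 :: t)
      = (a0.getD 0) :: fillL (a0.getD 0) t := by
    cases a0 <;> simp [fillL, Option.getD]
  cases a0 with
  | none => simpa [hfill, Option.getD] using zipWith_fillL t 0
  | some v =>
      simpa [hfill, Option.getD] using zipWith_fillL t v

-- A-side loop invariant
theorem loopA_inv (a0 : Option Int) (t : List (Option Int)) :
    ∀ k : Nat, k ≤ t.length →
    (PySem.List.pyRange 1 (1 + (k : Int)) 1).foldl (stepA (a0 :: t))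
        (List.replicate t.length (none : Option Int), a0.getD 0)
      = (refD (a0.getD 0) (t.take k) ++ List.replicate (t.length - k) (none : Option Int),
         lastNN (a0.getD 0) (t.take k)) := by
  intro k hk
  induction k with
  | zero => simp [PySem.List.pyRange_one_eq_nil, refD, lastNN]
  | succ k ih =>
    have hk' : k ≤ t.length := Nat.le_of_succ_le hk
    have hklt : k < t.length := hk
    have hk2 : k < (a0 :: t).length := by simp; omega
    have hcast : (1 : Int) + ((k + 1 : Nat) : Int) = (1 + (k : Int)) + 1 := by push_cast; ring
    rw [hcast, PySem.List.pyRange_one_succ_right (by omega), List.foldl_append,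
        ih hk']
    have htake : t.take (k + 1) = t.take k ++ [t[k]] := by
      rw [List.take_add_one, List.getElem?_eq_getElem hklt]; rfl
    -- indices accessed by the step
    have hidx1 : PySem.List.pyGet? (a0 :: t) (1 + (k : Int)) = some t[k] := by
      have : (1 + (k : Int)) = ((k + 1 : Nat) : Int) := by push_cast; ring
      rw [this, PySem.List.pyGet?_natCast]
      simp [List.getElem?_cons_succ, List.getElem?_eq_getElem hklt]
    have hidx0 : PySem.List.pyGet? (a0 :: t) ((1 + (k : Int)) - 1) = some ((a0 :: t)[k]'hk2) := by
      have h1 : (1 + (k : Int)) - 1 = ((k : Nat) : Int) := by ring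
      rw [h1, PySem.List.pyGet?_natCast, List.getElem?_eq_getElem hk2]
    have htoNat : ((1 + (k : Int)) - 1).toNat = k := by omega
    -- prev (when a[k] is non-None) equals the rolling last value
    have hprev : ∀ p : Int, (a0 :: t)[k]'hk2 = some p →
        lastNN (a0.getD 0) (t.take k) = p := by
      intro p hp
      cases k with
      | zero =>
        simp only [List.getElem_cons_zero] at hp
        simp [lastNN, hp]
      | succ j =>
        have hjlt : j < t.length := by omega
        have ht : t.take (j + 1) = t.take j ++ [t[j]] := by
          rw [List.take_add_one, List.getElem?_eq_getElem hjlt]; rfl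
        have hp' : t[j] = some p := by simpa using hp
        rw [ht, lastNN_append, hp']; rfl
    have hlen : (refD (a0.getD 0) (t.take k)).length = k := by
      rw [length_refD, List.length_take]; omega
    have hrep : t.length - k = (t.length - (k + 1)) + 1 := by omega
    have hset : ∀ v : Option Int,
        (refD (a0.getD 0) (t.take k) ++ List.replicate (t.length - k) (none : Option Int)).set k v
        = (refD (a0.getD 0) (t.take k) ++ [v]) ++ List.replicate (t.length - (k + 1)) (none : Option Int) := by
      intro v
      rw [hrep, List.replicate_succ, List.set_append_right _ _ (by omega), hlen,
          Nat.sub_self, List.set_cons_zero, List.append_assoc, List.singleton_append]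
    -- evaluate the step
    rw [List.foldl_cons, List.foldl_nil]
    unfold stepA
    rw [hidx1, hidx0]
    cases hv : t[k] with
    | none =>
      simp only [hset, htoNat]
      rw [htake, refD_append, lastNN_append, hv]
      rfl
    | some ai =>
      cases hv0 : (a0 :: t)[k]'hk2 with
      | none =>
        simp only [hset, htoNat]
        rw [htake, refD_append, lastNN_append, hv]
        rfl
      | some p =>
        simp only [hset, htoNat]
        rw [htake, refD_append, lastNN_append, hv, hprev p hv0]
        rfl

theorem gen_diff_eq_refD (a0 : Option Int) (t : List (Option Int)) :
    gen_diff (a0 :: t) = refD (a0.getD 0) t := by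
  unfold gen_diff
  rw [PySem.List.pyGet?_zero_cons]
  have hcast : (((a0 :: t).length : Nat) : Int) = 1 + (t.length : Int) := by
    simp; ring
  have hlen : (a0 :: t).length - 1 = t.length := by simp
  simp only [hcast, hlen]
  have := loopA_inv a0 t t.length le_rfl
  cases a0 with
  | none =>
    simp only [Option.getD] at this ⊢
    rw [this]
    simp
  | some v =>
    simp only [Option.getD] at this ⊢
    rw [this]
    simp

-- ===== VERDICT (by name: the statement is the Claim_ definition above) =====
theorem gen_diff_spec : Claim_equal_gen_diff := by
  intro a _ hpre
  unfold Spec_gen_diff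
  cases a with
  | nil => exact absurd rfl hpre
  | cons a0 t => rw [gen_diff_eq_refD, gen_diff_alt_eq_refD]
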